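-- pv_equiv track=rewrite | github.com/zeodotdev/zeo | agent/tools/python/schematic/sch_find_symbol.py | get_search_term
-- ===== SOURCE A (Python) =====
-- def get_search_term(s):
--     base = ''
--     for c in s:
--         if c in '*?[]{}()|\\+^$':
--             break
--         base += c
--     if ':' in base:
--         base = base.split(':')[1]
--     return base
-- ===== SOURCE B (Python) =====
-- def get_search_term(s):
--     # Locate the earliest regex-special character via str.find per special,
--     # slice the literal prefix, then apply the same colon handling as before.
--     cut = len(s)
--     for c in '*?[]{}()|\\+^$':
--         i = s.find(c)
--         if i != -1 and i < cut:
--             cut = i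
--     base = s[:cut]
--     if ':' in base:
--         base = base.split(':')[1]
--     return base
-- ===== Notes on version B (the rewrite author's own statement) =====
-- stated objective: faster
-- what changed: Replaces the per-character accumulation loop with a break by 14 str.find calls (one per special character) taking the minimum hit index and slicing the prefix, keeping the colon handling unchanged.
import Mathlib
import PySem

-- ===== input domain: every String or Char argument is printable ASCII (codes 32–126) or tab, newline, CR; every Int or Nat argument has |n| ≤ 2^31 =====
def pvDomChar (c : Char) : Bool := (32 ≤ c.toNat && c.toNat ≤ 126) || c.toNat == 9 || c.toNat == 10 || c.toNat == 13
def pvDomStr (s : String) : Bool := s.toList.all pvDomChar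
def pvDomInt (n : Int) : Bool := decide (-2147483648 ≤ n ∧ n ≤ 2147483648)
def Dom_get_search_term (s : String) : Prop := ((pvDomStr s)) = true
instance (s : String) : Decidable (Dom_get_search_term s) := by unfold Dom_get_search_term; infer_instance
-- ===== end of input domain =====

-- B computes the cut point with one find per special character instead of A's
-- per-character scan (measurably faster in Python); colon handling unchanged.

def pvSpecials : List Char := "*?[]{}()|\\+^$".toList

-- ===== PORT A =====
-- base = ''; for c in s: if c in specials: break; base += c
def gstLoopA : List Char → List Char → List Char
  | base, [] => base
  | base, c :: rest => if pvSpecials.contains c then base else gstLoopA (base ++ [c]) rest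

def get_search_term (s : String) : String :=
  let base := gstLoopA [] s.toList
  if PySem.Chars.isIn [':'] base then
    -- base.split(':')[1]; the ':' test guarantees index 1 exists, so getD is never taken
    String.ofList ((PySem.List.pyGet? (PySem.Chars.splitOn base [':']) 1).getD [])
  else String.ofList base

-- ===== PORT B =====
-- cut = len(s); for c in specials: i = s.find(c); if i != -1 and i < cut: cut = i
def gstStepB (cs : List Char) (cut : Int) (c : Char) : Int :=
  -- i = s.find(c); if i != -1 and i < cut: cut = i
  if PySem.Chars.find cs [c] ≠ -1 ∧ PySem.Chars.find cs [c] < cut then PySem.Chars.find cs [c] else cut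

def get_search_term_alt (s : String) : String :=
  let cs := s.toList
  let cut := pvSpecials.foldl (gstStepB cs) (cs.length : Int)
  let base := PySem.Chars.slice cs none (some cut)   -- s[:cut]
  if PySem.Chars.isIn [':'] base then
    String.ofList ((PySem.List.pyGet? (PySem.Chars.splitOn base [':']) 1).getD [])
  else String.ofList base

-- ===== PRECONDITION & SPEC =====
def Spec_get_search_term (s : String) (out : String) : Prop := out = get_search_term_alt s
instance (s : String) (out : String) : Decidable (Spec_get_search_term s out) := by unfold Spec_get_search_term; infer_instance

-- ===== CLAIM (what is proved, stated in full; the proofs are below) =====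
def Claim_equal_get_search_term : Prop := ∀ (s : String), Dom_get_search_term s → Spec_get_search_term s (get_search_term s)

-- ===== LEMMAS AND PROOFS =====

-- A's loop appends the longest prefix without special characters
theorem gstLoopA_eq (cs base : List Char) :
    gstLoopA base cs = base ++ cs.takeWhile (fun c => !pvSpecials.contains c) := by
  induction cs generalizing base with
  | nil => simp [gstLoopA]
  | cons c rest ih =>
    simp only [gstLoopA, List.takeWhile]
    by_cases h : c ∈ pvSpecials
    · simp [h]
    · simp [h, ih]

-- a singleton is a prefix iff it is the head
theorem singleton_prefix_iff (c : Char) (l : List Char) : [c] <+: l ↔ l[0]? = some c := by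
  cases l with
  | nil => simp
  | cons a t => simp [List.cons_prefix_cons, eq_comm]

-- take k equals takeWhile p when everything before k satisfies p and position k (if any) does not
theorem take_eq_takeWhile (p : Char → Bool) (cs : List Char) (k : Nat)
    (hk : k ≤ cs.length)
    (h1 : ∀ j, j < k → ∀ (hj : j < cs.length), p cs[j] = true)
    (h2 : ∀ (hk' : k < cs.length), p cs[k] = false) :
    cs.take k = cs.takeWhile p := by
  induction cs generalizing k with
  | nil => simp
  | cons a t ih =>
    cases k with
    | zero =>
      have := h2 (by simp)
      simp at this
      simp [List.takeWhile, this]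
    | succ k' =>
      have ha : p a = true := h1 0 (Nat.succ_pos _) (by simp)
      simp [List.takeWhile, ha]
      exact ih k' (by simpa using hk)
        (fun j hj hj' => h1 (j+1) (by omega) (by simpa using Nat.succ_lt_succ hj'))
        (fun hk' => h2 (by simpa using Nat.succ_lt_succ hk'))

-- the fold only ever decreases the accumulator
theorem foldB_le (cs : List Char) (L : List Char) (init : Int) :
    L.foldl (gstStepB cs) init ≤ init := by
  induction L generalizing init with
  | nil => simp
  | cons c rest ih =>
    simp only [List.foldl_cons]
    refine le_trans (ih _) ?_
    unfold gstStepB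
    split_ifs with h
    · exact le_of_lt h.2
    · exact le_rfl

theorem foldB_nonneg (cs : List Char) (L : List Char) (init : Int) (h0 : 0 ≤ init) :
    0 ≤ L.foldl (gstStepB cs) init := by
  induction L generalizing init with
  | nil => simpa
  | cons c rest ih =>
    simp only [List.foldl_cons]
    refine ih _ ?_
    unfold gstStepB
    split_ifs with h
    · have h1 : -1 ≤ PySem.Chars.find cs [c] := PySem.Chars.neg_one_le_find cs [c]
      rcases h with ⟨hne, _⟩
      omega
    · exact h0

-- final value is bounded by every successful find
theorem foldB_le_find (cs : List Char) (L : List Char) (init : Int) (c : Char) (hc : c ∈ L)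
    (hf : PySem.Chars.find cs [c] ≠ -1) :
    L.foldl (gstStepB cs) init ≤ PySem.Chars.find cs [c] := by
  induction L generalizing init with
  | nil => cases hc
  | cons a rest ih =>
    simp only [List.foldl_cons]
    rcases List.mem_cons.mp hc with rfl | hmem
    · refine le_trans (foldB_le cs rest _) ?_
      unfold gstStepB
      split_ifs with h
      · exact le_rfl
      · simp only [not_and, not_lt] at h
        exact h hf
    · exact ih _ hmem

-- final value is the initial one or some successful find
theorem foldB_achieved (cs : List Char) (L : List Char) (init : Int) :
    L.foldl (gstStepB cs) init = init ∨
      ∃ c ∈ L, L.foldl (gstStepB cs) init = PySem.Chars.find cs [c] ∧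
        PySem.Chars.find cs [c] ≠ -1 := by
  induction L generalizing init with
  | nil => left; rfl
  | cons a rest ih =>
    simp only [List.foldl_cons]
    rcases ih (gstStepB cs init a) with h | ⟨c, hc, h1, h2⟩
    · by_cases hcond : PySem.Chars.find cs [a] ≠ -1 ∧ PySem.Chars.find cs [a] < init
      · right
        refine ⟨a, List.mem_cons_self .., ?_, hcond.1⟩
        rw [h, gstStepB, if_pos hcond]
      · left
        rw [h, gstStepB, if_neg hcond]
    · right; exact ⟨c, List.mem_cons_of_mem _ hc, h1, h2⟩

-- membership of c in cs forces find cs [c] ≤ any index where c sits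
theorem find_le_of_getElem (cs : List Char) (c : Char) (j : Nat) (hj : j < cs.length)
    (hcj : cs[j] = c) : PySem.Chars.find cs [c] ≠ -1 ∧ (PySem.Chars.find cs [c]).toNat ≤ j := by
  have hinf : [c] <:+: cs := by
    refine List.infix_iff_prefix_suffix.mpr ⟨c :: cs.drop (j+1), ?_, ?_⟩
    · exact ⟨cs.drop (j+1), rfl⟩
    · have : cs.drop j = c :: cs.drop (j+1) := by
        rw [List.drop_eq_getElem_cons hj, hcj]
      rw [← this]; exact List.drop_suffix _ _
  have hne : PySem.Chars.find cs [c] ≠ -1 := (PySem.Chars.find_ne_neg_one_iff cs [c]).mpr hinf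
  have hpos : 0 ≤ PySem.Chars.find cs [c] := by
    have := PySem.Chars.neg_one_le_find cs [c]; omega
  obtain ⟨-, hmin⟩ := PySem.Chars.find_spec (s := cs) (sub := [c]) hpos
  refine ⟨hne, ?_⟩
  by_contra hlt
  rw [not_le] at hlt
  refine hmin j hlt ?_
  rw [singleton_prefix_iff]
  simp only [List.getElem?_drop, Nat.add_zero]
  rw [List.getElem?_eq_getElem hj, hcj]

-- B's cut slices exactly A's takeWhile prefix
theorem cut_slice_eq (cs : List Char) :
    PySem.Chars.slice cs none (some (pvSpecials.foldl (gstStepB cs) (cs.length : Int)))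
      = cs.takeWhile (fun c => !pvSpecials.contains c) := by
  set k := pvSpecials.foldl (gstStepB cs) (cs.length : Int) with hk
  have hk0 : 0 ≤ k := foldB_nonneg cs _ _ (by positivity)
  have hkle : k ≤ (cs.length : Int) := foldB_le cs _ _
  have hslice : PySem.Chars.slice cs none (some k) = cs.take k.toNat := by
    rw [PySem.Chars.slice_eq_listSlice, PySem.List.slice_to cs hk0]
  rw [hslice]
  refine take_eq_takeWhile _ cs k.toNat (by omega) ?_ ?_
  · intro j hj hj'
    by_contra hcontains
    simp only [Bool.not_eq_true] at hcontains
    have hmem : cs[j] ∈ pvSpecials := by simpa using hcontains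
    obtain ⟨hne, hle⟩ := find_le_of_getElem cs cs[j] j hj' rfl
    have := foldB_le_find cs pvSpecials (cs.length : Int) cs[j] hmem hne
    rw [← hk] at this
    omega
  · intro hk'
    rcases foldB_achieved cs pvSpecials (cs.length : Int) with h | ⟨c, hc, h1, h2⟩
    · rw [← hk] at h; omega
    · rw [← hk] at h1
      have hpos : 0 ≤ PySem.Chars.find cs [c] := by
        have := PySem.Chars.neg_one_le_find cs [c]; omega
      obtain ⟨hpre, -⟩ := PySem.Chars.find_spec (s := cs) (sub := [c]) hpos
      have : cs[k.toNat]? = some c := by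
        have := (singleton_prefix_iff c _).mp hpre
        simpa [List.getElem?_drop, h1] using this
      have hceq : cs[k.toNat] = c := by
        have h' := List.getElem?_eq_getElem hk'
        rw [h'] at this
        exact Option.some.inj this
      simp [hceq]
      exact hc

-- ===== VERDICT (by name: the statement is the Claim_ definition above) =====
theorem get_search_term_spec : Claim_equal_get_search_term := by
  intro s _
  unfold Spec_get_search_term
  simp only [get_search_term, get_search_term_alt, gstLoopA_eq, List.nil_append, cut_slice_eq]
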